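-- pv_equiv track=rewrite | github.com/raozeng/6mAPred-MSFF | 6mAPred_MS.py | calculate_K2_K3
-- ===== SOURCE A (Python) =====
-- def calculate_K2_K3(sequence):
--     X = []
--     dictNum2 = { 'AA':1, 'AC':2, 'AG':3, 'AT':4, 'CA':5, 'CC':6, 'CG':7, 'CT':8, 'GA':9,
--             'GC':10, 'GG':11, 'GT':12, 'TA':13, 'TC':14, 'TG':15, 'TT':16}
--             #,'AN':17,'TN':18,'CN':19,'GN':20, 'NN':21, 'NA':22, 'NT':23,'NC':24,'NG':25}
--
--     for index in range(len(sequence)-1):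
--         X.append(dictNum2["".join(sequence[index:index+2])])
--
--     dictNum3 = { 'AAA':1, 'AAC':2, 'AAG':3, 'AAT':4, 'ACA':5, 'ACC':6, 'ACG':7, 'ACT':8, 'AGA':9
--         , 'AGC':10, 'AGG':11, 'AGT':12, 'ATA':13, 'ATC':14, 'ATG':15, 'ATT':16
--         ,'CAA':17, 'CAC':18, 'CAG':19, 'CAT':20, 'CCA':21, 'CCC':22, 'CCG':23, 'CCT':24, 'CGA':25
--         , 'CGC':26, 'CGG':27, 'CGT':28, 'CTA':29, 'CTC':30, 'CTG':31, 'CTT':32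
--         ,'GAA':33, 'GAC':34, 'GAG':35, 'GAT':36, 'GCA':37, 'GCC':38, 'GCG':39, 'GCT':40, 'GGA':41
--         , 'GGC':42, 'GGG':43, 'GGT':44, 'GTA':45, 'GTC':46, 'GTG':47, 'GTT':48
--         ,'TAA':49, 'TAC':50, 'TAG':51, 'TAT':52, 'TCA':53, 'TCC':54, 'TCG':55, 'TCT':56, 'TGA':57
--         , 'TGC':58, 'TGG':59, 'TGT':60, 'TTA':61, 'TTC':62, 'TTG':63, 'TTT':64}
--
--     for index in range(len(sequence)-2):
--         X.append(dictNum3["".join(sequence[index:index+3])])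
--
--     return X
-- ===== SOURCE B (Python) =====
-- def calculate_K2_K3(sequence):
--     # Single left-to-right pass with a rolling base-4 window hash: roll always
--     # holds the code of the last (up to) 3 characters; each char is looked up once.
--     code = {'A': 0, 'C': 1, 'G': 2, 'T': 3}
--     if len(sequence) < 2:
--         return []
--     two = []
--     three = []
--     roll = code[sequence[0]]
--     for i in range(1, len(sequence)):
--         roll = roll % 16 * 4 + code[sequence[i]]
--         two.append(roll % 16 + 1)
--         if i >= 2:
--             three.append(roll + 1)
--     return two + three
-- ===== Notes on version B (the rewrite author's own statement) =====
-- stated objective: alternative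
-- what changed: B replaces A's two staged passes with per-window 16/64-entry dict lookups by one single pass maintaining a rolling base-4 window hash (each character looked up once in a 4-entry code map; the 2-mer code is roll%16+1 and the 3-mer code is roll+1), accumulating both output segments in the same loop.
import Mathlib
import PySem

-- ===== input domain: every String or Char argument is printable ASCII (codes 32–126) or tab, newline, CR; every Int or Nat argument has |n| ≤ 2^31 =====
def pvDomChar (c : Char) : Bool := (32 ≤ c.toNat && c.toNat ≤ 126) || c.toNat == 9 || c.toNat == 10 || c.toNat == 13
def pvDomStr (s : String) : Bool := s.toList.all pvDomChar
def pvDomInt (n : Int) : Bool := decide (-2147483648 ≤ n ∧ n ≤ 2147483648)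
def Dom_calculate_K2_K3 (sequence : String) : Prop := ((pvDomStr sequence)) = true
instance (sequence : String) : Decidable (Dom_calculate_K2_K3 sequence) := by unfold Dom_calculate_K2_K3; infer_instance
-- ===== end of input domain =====

-- B replaces A's two staged passes with per-window 16/64-entry dict lookups by one single
-- pass with a rolling base-4 window hash (each character looked up once), same cost.

-- ===== PORT A =====
def pvDict2 : PySem.Dict (List Char) Int := PySem.Dict.ofList [(['A', 'A'], 1), (['A', 'C'], 2), (['A', 'G'], 3), (['A', 'T'], 4), (['C', 'A'], 5), (['C', 'C'], 6), (['C', 'G'], 7), (['C', 'T'], 8), (['G', 'A'], 9), (['G', 'C'], 10), (['G', 'G'], 11), (['G', 'T'], 12), (['T', 'A'], 13), (['T', 'C'], 14), (['T', 'G'], 15), (['T', 'T'], 16)]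
def pvDict3 : PySem.Dict (List Char) Int := PySem.Dict.ofList [(['A', 'A', 'A'], 1), (['A', 'A', 'C'], 2), (['A', 'A', 'G'], 3), (['A', 'A', 'T'], 4), (['A', 'C', 'A'], 5), (['A', 'C', 'C'], 6), (['A', 'C', 'G'], 7), (['A', 'C', 'T'], 8), (['A', 'G', 'A'], 9), (['A', 'G', 'C'], 10), (['A', 'G', 'G'], 11), (['A', 'G', 'T'], 12), (['A', 'T', 'A'], 13), (['A', 'T', 'C'], 14), (['A', 'T', 'G'], 15), (['A', 'T', 'T'], 16), (['C', 'A', 'A'], 17), (['C', 'A', 'C'], 18), (['C', 'A', 'G'], 19), (['C', 'A', 'T'], 20), (['C', 'C', 'A'], 21), (['C', 'C', 'C'], 22), (['C', 'C', 'G'], 23), (['C', 'C', 'T'], 24), (['C', 'G', 'A'], 25), (['C', 'G', 'C'], 26), (['C', 'G', 'G'], 27), (['C', 'G', 'T'], 28), (['C', 'T', 'A'], 29), (['C', 'T', 'C'], 30), (['C', 'T', 'G'], 31), (['C', 'T', 'T'], 32), (['G', 'A', 'A'], 33), (['G', 'A', 'C'], 34), (['G', 'A', 'G'], 35), (['G',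 'A', 'T'], 36), (['G', 'C', 'A'], 37), (['G', 'C', 'C'], 38), (['G', 'C', 'G'], 39), (['G', 'C', 'T'], 40), (['G', 'G', 'A'], 41), (['G', 'G', 'C'], 42), (['G', 'G', 'G'], 43), (['G', 'G', 'T'], 44), (['G', 'T', 'A'], 45), (['G', 'T', 'C'], 46), (['G', 'T', 'G'], 47), (['G', 'T', 'T'], 48), (['T', 'A', 'A'], 49), (['T', 'A', 'C'], 50), (['T', 'A', 'G'], 51), (['T', 'A', 'T'], 52), (['T', 'C', 'A'], 53), (['T', 'C', 'C'], 54), (['T', 'C', 'G'], 55), (['T', 'C', 'T'], 56), (['T', 'G', 'A'], 57), (['T', 'G', 'C'], 58), (['T', 'G', 'G'], 59), (['T', 'G', 'T'], 60), (['T', 'T', 'A'], 61), (['T', 'T', 'C'], 62), (['T', 'T', 'G'], 63), (['T', 'T', 'T'], 64)]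

def calculate_K2_K3 (sequence : String) : List Int :=
  let l := sequence.toList
  -- first loop: for index in range(len(sequence)-1): X.append(dictNum2["".join(sequence[index:index+2])])
  let X := (PySem.List.pyRange 0 ((l.length : Int) - 1) 1).foldl
    (fun X i => X ++ [pvDict2.getD (PySem.List.slice l (some i) (some (i + 2))) 0]) []
  -- second loop: for index in range(len(sequence)-2): X.append(dictNum3["".join(sequence[index:index+3])])
  (PySem.List.pyRange 0 ((l.length : Int) - 2) 1).foldl
    (fun X i => X ++ [pvDict3.getD (PySem.List.slice l (some i) (some (i + 3))) 0]) X

-- ===== PORT B =====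
def pvCode : PySem.Dict Char Int := PySem.Dict.ofList [('A', 0), ('C', 1), ('G', 2), ('T', 3)]

def calculate_K2_K3_alt (sequence : String) : List Int :=
  let l := sequence.toList
  if l.length < 2 then []
  else
    -- for i in range(1, len(sequence)): roll = roll % 16 * 4 + code[sequence[i]]; …
    let st := (PySem.List.pyRange 1 (l.length : Int) 1).foldl
      (fun (st : List Int × List Int × Int) i =>
        let roll := st.2.2 % 16 * 4 + pvCode.getD (PySem.List.pyGetD l i ' ') 0
        (st.1 ++ [roll % 16 + 1],
         (if 2 ≤ i then st.2.1 ++ [roll + 1] else st.2.1),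
         roll))
      ([], [], pvCode.getD (PySem.List.pyGetD l 0 ' ') 0)
    st.1 ++ st.2.1

-- ===== PRECONDITION & SPEC =====
-- Pre_ excludes exactly the inputs where A raises KeyError: a string of length ≥ 2
-- containing a character other than A/C/G/T.
def Pre_calculate_K2_K3 (sequence : String) : Prop :=
  sequence.toList.length ≤ 1 ∨
    sequence.toList.all (fun c => c == 'A' || c == 'C' || c == 'G' || c == 'T') = true
instance (sequence : String) : Decidable (Pre_calculate_K2_K3 sequence) := by
  unfold Pre_calculate_K2_K3; infer_instance

def pvWitness_calculate_K2_K3 : String := "AC"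

def Spec_calculate_K2_K3 (sequence : String) (out : List Int) : Prop := out = calculate_K2_K3_alt sequence
instance (sequence : String) (out : List Int) : Decidable (Spec_calculate_K2_K3 sequence out) := by unfold Spec_calculate_K2_K3; infer_instance

-- ===== CLAIM (what is proved, stated in full; the proofs are below) =====
def Claim_equal_calculate_K2_K3 : Prop := ∀ (sequence : String), Dom_calculate_K2_K3 sequence → Pre_calculate_K2_K3 sequence → Spec_calculate_K2_K3 sequence (calculate_K2_K3 sequence)

-- ===== LEMMAS AND PROOFS =====

-- the code of the character at position k (default for out-of-range / non-ACGT is 0)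
def pvG (l : List Char) (k : Nat) : Int := pvCode.getD (l.getD k ' ') 0

-- the rolling window value after step k of B's loop
def pvR (l : List Char) : Nat → Int
  | 0 => pvG l 0
  | k + 1 => pvR l k % 16 * 4 + pvG l (k + 1)

theorem pvCode_bounds (c : Char) : 0 ≤ pvCode.getD c 0 ∧ pvCode.getD c 0 < 4 := by
  simp only [pvCode, PySem.Dict.getD, PySem.Dict.get?,
    show (PySem.Dict.ofList [('A', (0 : Int)), ('C', 1), ('G', 2), ('T', 3)]).items
      = [('A', 0), ('C', 1), ('G', 2), ('T', 3)] from rfl,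
    List.find?]
  rcases h1 : 'A' == c <;> rcases h2 : 'C' == c <;> rcases h3 : 'G' == c <;>
    rcases h4 : 'T' == c <;> simp

theorem pvG_bounds (l : List Char) (k : Nat) : 0 ≤ pvG l k ∧ pvG l k < 4 :=
  pvCode_bounds (l.getD k ' ')

theorem pvR_mod4 (l : List Char) (k : Nat) : pvR l k % 4 = pvG l k := by
  cases k with
  | zero =>
    have := pvG_bounds l 0
    unfold pvR; omega
  | succ n =>
    have := pvG_bounds l (n + 1)
    unfold pvR; omega

theorem pvR_succ_mod16 (l : List Char) (k : Nat) :
    pvR l (k + 1) % 16 = 4 * pvG l k + pvG l (k + 1) := by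
  have h1 := pvR_mod4 l k
  have h2 := pvG_bounds l k
  have h3 := pvG_bounds l (k + 1)
  unfold pvR; omega

theorem pvR_succ2 (l : List Char) (k : Nat) :
    pvR l (k + 2) = 16 * pvG l k + 4 * pvG l (k + 1) + pvG l (k + 2) := by
  have h1 := pvR_succ_mod16 l k
  show pvR l (k + 1) % 16 * 4 + pvG l (k + 2) = _
  omega

-- loop invariant of B's single pass: after range(1, j+1) the state is the two maps and pvR l j
theorem pv_fold_inv (l : List Char) (j : Nat) :
    (PySem.List.pyRange 1 ((j : Int) + 1) 1).foldl
      (fun (st : List Int × List Int × Int) i =>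
        let roll := st.2.2 % 16 * 4 + pvCode.getD (PySem.List.pyGetD l i ' ') 0
        (st.1 ++ [roll % 16 + 1],
         (if 2 ≤ i then st.2.1 ++ [roll + 1] else st.2.1),
         roll))
      ([], [], pvCode.getD (PySem.List.pyGetD l 0 ' ') 0)
    = ((List.range j).map (fun k => pvR l (k + 1) % 16 + 1),
       (List.range (j - 1)).map (fun k => pvR l (k + 2) + 1),
       pvR l j) := by
  induction j with
  | zero =>
    rw [show ((0 : Nat) : Int) + 1 = 1 by norm_num,
      PySem.List.pyRange_one_eq_nil (le_refl 1)]
    simp [pvR, pvG, PySem.List.pyGetD_zero]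
  | succ n ih =>
    rw [show ((n + 1 : Nat) : Int) + 1 = ((n : Int) + 1) + 1 by push_cast; ring,
      PySem.List.pyRange_one_succ_right (by omega : (1 : Int) ≤ (n : Int) + 1),
      List.foldl_append, ih]
    simp only [List.foldl_cons, List.foldl_nil]
    have hget : PySem.List.pyGetD l ((n : Int) + 1) ' ' = l.getD (n + 1) ' ' := by
      rw [show ((n : Int) + 1) = ((n + 1 : Nat) : Int) by push_cast; ring,
        PySem.List.pyGetD_natCast]
    have hroll : pvR l n % 16 * 4 + pvCode.getD (PySem.List.pyGetD l ((n : Int) + 1) ' ') 0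
        = pvR l (n + 1) := by
      rw [hget]; rfl
    refine Prod.ext ?_ (Prod.ext ?_ ?_) <;> simp only [hroll]
    · rw [List.range_succ, List.map_append]; rfl
    · by_cases hn : 1 ≤ n
      · rw [if_pos (by omega : (2 : Int) ≤ (n : Int) + 1)]
        rw [show n + 1 - 1 = (n - 1) + 1 by omega, List.range_succ, List.map_append]
        simp only [List.map_cons, List.map_nil]
        rw [show n - 1 + 2 = n + 1 by omega]
      · have hn0 : n = 0 := by omega
        subst hn0
        rw [if_neg (by norm_num)]

-- A's first loop equals B's 2-mer segment (under Pre_: all chars ACGT)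
theorem pv_two_eq (l : List Char)
    (h : ∀ c ∈ l, c = 'A' ∨ c = 'C' ∨ c = 'G' ∨ c = 'T') :
    (PySem.List.pyRange 0 ((l.length : Int) - 1) 1).map
      (fun i => pvDict2.getD (PySem.List.slice l (some i) (some (i + 2))) 0)
    = (List.range (l.length - 1)).map (fun k => pvR l (k + 1) % 16 + 1) := by
  apply List.ext_getElem
  · simp [PySem.List.length_pyRange_one]
  · intro k h1 h2
    have hk1 : k + 1 < l.length := by
      simp [PySem.List.length_pyRange_one] at h1; omega
    have hk : k < l.length := by omega
    simp only [List.getElem_map, PySem.List.getElem_pyRange_one, zero_add,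
      List.getElem_range]
    rw [pvR_succ_mod16]
    have hg1 : pvG l k = pvCode.getD l[k] 0 := by
      unfold pvG; rw [List.getD_eq_getElem l ' ' hk]
    have hg2 : pvG l (k + 1) = pvCode.getD l[k + 1] 0 := by
      unfold pvG; rw [List.getD_eq_getElem l ' ' hk1]
    rw [show ((k : Int) + 2) = (((k + 2 : Nat)) : Int) by push_cast; ring,
      PySem.List.slice_natCast,
      show k + 2 - k = 2 from by omega,
      List.drop_eq_getElem_cons hk, List.drop_eq_getElem_cons hk1,
      hg1, hg2]
    rcases h l[k] (l.getElem_mem hk) with e1 | e1 | e1 | e1 <;>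
      rcases h l[k + 1] (l.getElem_mem hk1) with e2 | e2 | e2 | e2 <;>
        rw [e1, e2] <;> rfl

-- A's second loop equals B's 3-mer segment (under Pre_)
set_option maxRecDepth 8192 in
theorem pv_three_eq (l : List Char)
    (h : ∀ c ∈ l, c = 'A' ∨ c = 'C' ∨ c = 'G' ∨ c = 'T') :
    (PySem.List.pyRange 0 ((l.length : Int) - 2) 1).map
      (fun i => pvDict3.getD (PySem.List.slice l (some i) (some (i + 3))) 0)
    = (List.range (l.length - 1 - 1)).map (fun k => pvR l (k + 2) + 1) := by
  apply List.ext_getElem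
  · simp [PySem.List.length_pyRange_one]; omega
  · intro k h1 h2
    have hk2 : k + 2 < l.length := by
      simp [PySem.List.length_pyRange_one] at h1; omega
    have hk1 : k + 1 < l.length := by omega
    have hk : k < l.length := by omega
    simp only [List.getElem_map, PySem.List.getElem_pyRange_one, zero_add,
      List.getElem_range]
    rw [pvR_succ2]
    have hg1 : pvG l k = pvCode.getD l[k] 0 := by
      unfold pvG; rw [List.getD_eq_getElem l ' ' hk]
    have hg2 : pvG l (k + 1) = pvCode.getD l[k + 1] 0 := by
      unfold pvG; rw [List.getD_eq_getElem l ' ' hk1]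
    have hg3 : pvG l (k + 2) = pvCode.getD l[k + 2] 0 := by
      unfold pvG; rw [List.getD_eq_getElem l ' ' hk2]
    rw [show ((k : Int) + 3) = (((k + 3 : Nat)) : Int) by push_cast; ring,
      PySem.List.slice_natCast,
      show k + 3 - k = 3 from by omega,
      List.drop_eq_getElem_cons hk, List.drop_eq_getElem_cons hk1,
      List.drop_eq_getElem_cons hk2, hg1, hg2, hg3]
    rw [show List.take 3 (l[k] :: l[k + 1] :: l[k + 2] :: List.drop (k + 2 + 1) l)
          = [l[k], l[k + 1], l[k + 2]] from rfl]
    rcases h l[k] (l.getElem_mem hk) with e1 | e1 | e1 | e1 <;>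
      rcases h l[k + 1] (l.getElem_mem hk1) with e2 | e2 | e2 | e2 <;>
        rcases h l[k + 2] (l.getElem_mem hk2) with e3 | e3 | e3 | e3 <;>
          rw [e1, e2, e3] <;> decide

-- ===== VERDICT (by name: the statement is the Claim_ definition above) =====
theorem calculate_K2_K3_spec : Claim_equal_calculate_K2_K3 := by
  intro s _ hpre
  unfold Spec_calculate_K2_K3
  simp only [calculate_K2_K3, calculate_K2_K3_alt]
  by_cases hlen : s.toList.length < 2
  · rw [if_pos hlen]
    have h1 : ((s.toList.length : Int) - 1) ≤ 0 := by omega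
    have h2 : ((s.toList.length : Int) - 2) ≤ 0 := by omega
    rw [PySem.List.pyRange_one_eq_nil h1, PySem.List.pyRange_one_eq_nil h2]
    rfl
  · rw [if_neg hlen]
    have hACGT : ∀ c ∈ s.toList, c = 'A' ∨ c = 'C' ∨ c = 'G' ∨ c = 'T' := by
      rcases hpre with h | h
      · omega
      · intro c hc
        have := List.all_eq_true.mp h c hc
        simp only [Bool.or_eq_true, beq_iff_eq] at this
        tauto
    have hfold := pv_fold_inv s.toList (s.toList.length - 1)
    rw [show ((s.toList.length - 1 : Nat) : Int) + 1 = (s.toList.length : Int) by omega]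
      at hfold
    rw [hfold]
    rw [PySem.List.foldl_append_singleton_eq_map, PySem.List.foldl_append_singleton_eq_map,
      List.nil_append, pv_two_eq _ hACGT, pv_three_eq _ hACGT]
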